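-- pv_equiv track=rewrite | github.com/thealper2/codewars-solutions | 8-kyu/draw_stairs.py | draw_stairs
-- ===== SOURCE A (Python) =====
-- def draw_stairs(n):
--     result = ""
--     i = 1
--     while i < n:
--         result += "I\n"
--         result += " " * i
--         i += 1
--
--     result += "I"
--
--     return str(result)
-- ===== SOURCE B (Python) =====
-- def draw_stairs(n):
--     m = n if n > 1 else 1
--     size = m * (m + 3) // 2 - 1
--     buf = bytearray(b" " * size)
--     for i in range(m):
--         p = i * (i + 3) // 2
--         buf[p + i] = ord("I")
--         if i + 1 < m:
--             buf[p + i + 1] = ord("\n")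
--     return buf.decode("ascii")
-- ===== Notes on version B (the rewrite author's own statement) =====
-- stated objective: faster
-- what changed: Instead of A's sequential string accumulation (repeatedly appending the stair marker, a newline and the next line's indentation), B computes the staircase's total length in closed form, allocates one flat space-filled bytearray, and places each marker and newline directly at its closed-form triangular-number offset by index arithmetic.
import Mathlib
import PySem

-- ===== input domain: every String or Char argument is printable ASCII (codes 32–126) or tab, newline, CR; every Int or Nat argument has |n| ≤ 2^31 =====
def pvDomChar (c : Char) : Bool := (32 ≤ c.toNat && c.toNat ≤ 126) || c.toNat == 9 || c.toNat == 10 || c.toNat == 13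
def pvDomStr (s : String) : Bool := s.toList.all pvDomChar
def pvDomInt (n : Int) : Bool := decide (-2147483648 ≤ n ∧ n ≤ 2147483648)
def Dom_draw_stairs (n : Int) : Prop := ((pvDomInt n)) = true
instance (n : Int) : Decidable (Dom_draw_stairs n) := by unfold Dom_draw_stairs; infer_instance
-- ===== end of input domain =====

-- B allocates a flat space-filled buffer of the closed-form total size and
-- places each 'I' and '\n' by triangular-number index arithmetic, instead of
-- A's sequential string accumulation (alternative algorithm).

-- ===== PORT A =====
-- A's while loop: fuel = number of remaining iterations (n - i); state (i, result).
def drawStairsLoopA : Nat → Int → List Char → List Char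
  | 0, _, acc => acc
  | k + 1, i, acc =>
      drawStairsLoopA k (i + 1) (acc ++ ['I', '\n'] ++ List.replicate i.toNat ' ')

def draw_stairs (n : Int) : String :=
  String.ofList (drawStairsLoopA (n - 1).toNat 1 [] ++ ['I'])

-- ===== PORT B =====
-- One iteration of Source B's for-loop body: p = i*(i+3)//2; buf[p+i]='I';
-- if i+1 < m: buf[p+i+1]='\n'  (every written index is in range, so
-- List.set matches bytearray assignment exactly).
def drawStairsFillStep (m : Int) (buf : List Char) (i : Int) : List Char :=
  let p := PySem.Int.floordiv (i * (i + 3)) 2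
  let buf1 := buf.set (p + i).toNat 'I'
  if i + 1 < m then buf1.set (p + i + 1).toNat '\n' else buf1

-- Source B's body after the locals m (line count) and size are fixed:
-- buf = size spaces; for i in range(m): place 'I' and '\n'; decode.
def drawStairsAltAux (m : Int) : String :=
  String.ofList
    ((PySem.List.pyRange 0 m 1).foldl (drawStairsFillStep m)
      (List.replicate (PySem.Int.floordiv (m * (m + 3)) 2 - 1).toNat ' '))

def draw_stairs_alt (n : Int) : String :=
  drawStairsAltAux (if 1 < n then n else 1)

-- ===== PRECONDITION & SPEC =====
def Spec_draw_stairs (n : Int) (out : String) : Prop := out = draw_stairs_alt n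
instance (n : Int) (out : String) : Decidable (Spec_draw_stairs n out) := by unfold Spec_draw_stairs; infer_instance

-- ===== CLAIM =====
def Claim_equal_draw_stairs : Prop := ∀ (n : Int), Dom_draw_stairs n → Spec_draw_stairs n (draw_stairs n)

-- ===== LEMMAS AND PROOFS =====

-- Length of the first k staircase lines, each with its trailing newline.
def lenP : Nat → Nat
  | 0 => 0
  | k + 1 => lenP k + (k + 2)

-- The first k staircase lines, each with its trailing newline.
def prefC : Nat → List Char
  | 0 => []
  | k + 1 => prefC k ++ List.replicate k ' ' ++ ['I', '\n']

theorem lenP_eq (k : Nat) : 2 * lenP k = k * (k + 3) := by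
  induction k with
  | zero => rfl
  | succ k ih =>
      have h1 : (k + 1) * ((k + 1) + 3) = k * k + 5 * k + 4 := by ring
      have h2 : k * (k + 3) = k * k + 3 * k := by ring
      simp only [lenP]
      omega

theorem floordiv_tri (k : Nat) :
    PySem.Int.floordiv ((k : Int) * ((k : Int) + 3)) 2 = (lenP k : Int) := by
  have h2 : (k : Int) * ((k : Int) + 3) = 2 * (lenP k : Int) := by
    exact_mod_cast (lenP_eq k).symm
  rw [h2, PySem.Int.floordiv_eq_ediv_of_pos (by norm_num)]
  omega

theorem prefC_length (k : Nat) : (prefC k).length = lenP k := by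
  induction k with
  | zero => rfl
  | succ k ih => simp [prefC, lenP, ih]

theorem lenP_le (j k : Nat) (h : j ≤ k) : lenP j + 2 * (k - j) ≤ lenP k := by
  induction k with
  | zero =>
      have hj : j = 0 := Nat.le_zero.mp h
      subst hj; simp [lenP]
  | succ k ih =>
      rcases Nat.lt_or_ge j (k + 1) with hlt | hge
      · have := ih (by omega)
        simp only [lenP]; omega
      · have : j = k + 1 := by omega
        subst this; omega

theorem set_shift (pre : List Char) : ∀ (rest : List Char) (j : Nat) (c : Char),
    (pre ++ rest).set (pre.length + j) c = pre ++ rest.set j c := by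
  induction pre with
  | nil => intro rest j c; simp
  | cons a t ih =>
      intro rest j c
      simp only [List.cons_append, List.length_cons]
      have hidx : t.length + 1 + j = (t.length + j) + 1 := by omega
      rw [hidx, List.set_cons_succ, ih]

theorem set_replicate (j : Nat) : ∀ (r : Nat) (c : Char), j < r →
    (List.replicate r ' ').set j c
      = List.replicate j ' ' ++ c :: List.replicate (r - j - 1) ' ' := by
  induction j with
  | zero =>
      intro r c h
      cases r with
      | zero => omega
      | succ s => simp [List.replicate_succ]
  | succ j ih =>
      intro r c h
      cases r with
      | zero => omega
      | succ s =>
          rw [List.replicate_succ, List.set_cons_succ, ih s c (by omega)]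
          simp [List.replicate_succ]

-- One loop-body application at i = k, in closed form.
theorem step_eq (m : Int) (k : Nat) (buf : List Char) :
    drawStairsFillStep m buf (k : Int)
      = if (k : Int) + 1 < m
        then (buf.set (lenP k + k) 'I').set (lenP k + k + 1) '\n'
        else buf.set (lenP k + k) 'I' := by
  simp only [drawStairsFillStep]
  rw [floordiv_tri]
  have h1 : ((lenP k : Int) + (k : Int)).toNat = lenP k + k := by omega
  have h2 : ((lenP k : Int) + (k : Int) + 1).toNat = lenP k + k + 1 := by omega
  rw [h1, h2]

-- Invariant: after the first k iterations the buffer is the k written lines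
-- followed by untouched spaces.
theorem fill_inv (m : Int) (k : Nat) (hk : (k : Int) ≤ m - 1) :
    (PySem.List.pyRange 0 (k : Int) 1).foldl (drawStairsFillStep m)
        (List.replicate (lenP m.toNat - 1) ' ')
      = prefC k ++ List.replicate (lenP m.toNat - 1 - lenP k) ' ' := by
  induction k with
  | zero => simp [PySem.List.pyRange_one_eq_nil, prefC, lenP]
  | succ k ih =>
      have hk' : (k : Int) ≤ m - 1 := by push_cast at hk ⊢; omega
      have hle : (0 : Int) ≤ (k : Int) := Int.natCast_nonneg k
      have hsplit : PySem.List.pyRange 0 ((k : Int) + 1) 1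
          = PySem.List.pyRange 0 (k : Int) 1 ++ [(k : Int)] :=
        PySem.List.pyRange_one_succ_right hle
      have hcast : ((k + 1 : Nat) : Int) = ((k : Int) + 1) := by push_cast; ring
      rw [hcast, hsplit, List.foldl_append, ih hk']
      simp only [List.foldl_cons, List.foldl_nil]
      rw [step_eq]
      set R : Nat := lenP m.toNat - 1 - lenP k with hR
      -- the remaining space region has at least k+2 cells
      have hmt : k + 2 ≤ m.toNat := by omega
      have hlen : lenP (k + 2) ≤ lenP m.toNat := by
        have := lenP_le (k + 2) m.toNat hmt; omega
      have hRge : k + 2 ≤ R := by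
        simp only [lenP] at hlen; omega
      have hcond : ((k : Nat) : Int) + 1 < m := by omega
      rw [if_pos hcond]
      have w1 : (prefC k ++ List.replicate R ' ').set (lenP k + k) 'I'
          = (prefC k ++ (List.replicate k ' ' ++ ['I'])) ++ List.replicate (R - k - 1) ' ' := by
        have e1 : lenP k + k = (prefC k).length + k := by rw [prefC_length]
        rw [e1, set_shift, set_replicate k R 'I' (by omega)]
        simp
      have w2 : ((prefC k ++ (List.replicate k ' ' ++ ['I'])) ++ List.replicate (R - k - 1) ' ').set
            (lenP k + k + 1) '\n'
          = (prefC k ++ (List.replicate k ' ' ++ ['I'])) ++ '\n' :: List.replicate (R - k - 2) ' ' := by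
        have e2 : lenP k + k + 1 = (prefC k ++ (List.replicate k ' ' ++ ['I'])).length + 0 := by
          simp [prefC_length]; omega
        rw [e2, set_shift, set_replicate 0 (R - k - 1) '\n' (by omega)]
        have e3 : R - k - 1 - 1 = R - k - 2 := by omega
        simp [e3]
      rw [w1, w2]
      have e4 : R - k - 2 = lenP m.toNat - 1 - lenP (k + 1) := by
        simp only [lenP]; omega
      simp [prefC, e4]

-- The full fold produces the staircase: m lines, the last one without newline.
theorem fill_full (m : Int) (hm : 1 ≤ m) :
    (PySem.List.pyRange 0 m 1).foldl (drawStairsFillStep m)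
        (List.replicate (lenP m.toNat - 1) ' ')
      = prefC (m.toNat - 1) ++ List.replicate (m.toNat - 1) ' ' ++ ['I'] := by
  set k := m.toNat - 1 with hkdef
  have hmk : m = ((k : Nat) : Int) + 1 := by omega
  have hle : (0 : Int) ≤ (k : Int) := Int.natCast_nonneg k
  have hsplit : PySem.List.pyRange 0 m 1
      = PySem.List.pyRange 0 (k : Int) 1 ++ [(k : Int)] := by
    rw [hmk]; exact PySem.List.pyRange_one_succ_right hle
  rw [hsplit, List.foldl_append, fill_inv m k (by omega)]
  simp only [List.foldl_cons, List.foldl_nil]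
  rw [step_eq, if_neg (by omega)]
  have hRk : lenP m.toNat - 1 - lenP k = k + 1 := by
    have hmt : m.toNat = k + 1 := by omega
    rw [hmt]; simp only [lenP]; omega
  rw [hRk]
  have e1 : lenP k + k = (prefC k).length + k := by rw [prefC_length]
  rw [e1, set_shift, set_replicate k (k + 1) 'I' (by omega)]
  simp

-- Peel off the LAST iteration of A's loop.
theorem drawStairsLoopA_succ (m : Nat) : ∀ (i : Int) (acc : List Char),
    drawStairsLoopA (m + 1) i acc
      = drawStairsLoopA m i acc ++ ['I', '\n'] ++ List.replicate (i + m).toNat ' ' := by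
  induction m with
  | zero => intro i acc; simp [drawStairsLoopA]
  | succ m ih =>
      intro i acc
      show drawStairsLoopA (m + 1) (i + 1) _ = _
      rw [ih]
      have h : i + 1 + (m : Int) = i + ((m : Int) + 1) := by ring
      simp [drawStairsLoopA, h]

-- A's loop output after k iterations: k full lines plus the indentation of line k.
theorem loopA_eq_prefC (k : Nat) :
    drawStairsLoopA k 1 [] = prefC k ++ List.replicate k ' ' := by
  induction k with
  | zero => simp [drawStairsLoopA, prefC]
  | succ k ih =>
      rw [drawStairsLoopA_succ, ih]
      have h : ((1 : Int) + (k : Int)).toNat = k + 1 := by omega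
      simp [prefC, h, List.replicate_succ]

theorem draw_stairs_eq (n : Int) : draw_stairs n = draw_stairs_alt n := by
  unfold draw_stairs draw_stairs_alt drawStairsAltAux
  set m : Int := if 1 < n then n else 1 with hm
  have hm1 : 1 ≤ m := by rw [hm]; split <;> omega
  have hmn : (n - 1).toNat = m.toNat - 1 := by rw [hm]; split <;> omega
  have hlen1 : lenP 1 = 2 := rfl
  have hlenm : 1 ≤ lenP m.toNat := by
    have := lenP_le 1 m.toNat (by omega); omega
  have hsz : PySem.Int.floordiv (m * (m + 3)) 2 - 1 = ((lenP m.toNat - 1 : Nat) : Int) := by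
    have hc : m = ((m.toNat : Nat) : Int) := by omega
    conv_lhs => rw [hc]
    rw [floordiv_tri]; omega
  rw [hsz]
  apply congrArg String.ofList
  rw [Int.toNat_natCast, fill_full m hm1, hmn, loopA_eq_prefC]

-- ===== VERDICT =====
theorem draw_stairs_spec : Claim_equal_draw_stairs := by
  intro n _
  exact draw_stairs_eq n
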